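-- pv_equiv track=rewrite | github.com/KaldarrostaJazz/SimulationsStimulations | NerualAnnulus.py | account_cycles
-- ===== SOURCE A (Python) =====
-- def account_cycles(vector, prev):
--     resultArray = [prev,]
--     for x in vector[1::]:
--         if (x < prev):
--             while (x < prev):
--                 x += 100
--             resultArray.append(x)
--         else:
--             resultArray.append(x)
--         prev = x
--     return resultArray
-- ===== SOURCE B (Python) =====
-- def account_cycles(vector, prev):
--     # branchless closed form: add 100*ceil((prev-x)/100) instead of the inner while loop
--     res = [prev]
--     for x in vector[1:]:
--         x += 100 * max(0, -((x - prev) // 100))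
--         res.append(x)
--         prev = x
--     return res
-- ===== Notes on version B (the rewrite author's own statement) =====
-- stated objective: faster
-- what changed: The inner while loop that adds 100 repeatedly is replaced by a branchless closed-form ceiling-division step x += 100*max(0, -((x-prev)//100)).
import Mathlib
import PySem

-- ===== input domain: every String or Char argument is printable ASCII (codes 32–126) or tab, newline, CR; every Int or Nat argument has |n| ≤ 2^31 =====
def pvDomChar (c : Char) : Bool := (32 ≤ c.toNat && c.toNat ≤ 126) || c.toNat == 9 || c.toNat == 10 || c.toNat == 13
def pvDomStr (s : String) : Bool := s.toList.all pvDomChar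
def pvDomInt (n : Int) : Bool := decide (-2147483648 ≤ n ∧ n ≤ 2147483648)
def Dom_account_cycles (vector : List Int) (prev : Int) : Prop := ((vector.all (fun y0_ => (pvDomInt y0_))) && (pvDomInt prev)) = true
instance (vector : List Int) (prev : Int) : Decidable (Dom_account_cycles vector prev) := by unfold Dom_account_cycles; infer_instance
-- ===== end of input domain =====

-- B replaces A's inner `while x < prev: x += 100` by one closed-form ceiling-division step (objective: faster).

-- ===== PORT A =====
-- the inner `while (x < prev): x += 100`
def pyWhileAdd (x prev : Int) : Int :=
  if x < prev then pyWhileAdd (x + 100) prev else x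
termination_by (prev - x).toNat
decreasing_by omega

-- the `for x in vector[1::]` loop, carrying prev; returns the appended tail
def accLoopA : List Int → Int → List Int
  | [], _ => []
  | x :: rest, prev =>
    if x < prev then
      let x' := pyWhileAdd x prev
      x' :: accLoopA rest x'
    else
      x :: accLoopA rest x

def account_cycles (vector : List Int) (prev : Int) : List Int :=
  prev :: accLoopA (PySem.List.slice vector (some 1) none) prev

-- ===== PORT B =====
-- branchless closed form: x += 100 * max(0, -((x - prev) // 100))
def accLoopB : List Int → Int → List Int
  | [], _ => []
  | x :: rest, prev =>
    let x' := x + 100 * max 0 (-(PySem.Int.floordiv (x - prev) 100))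
    x' :: accLoopB rest x'

def account_cycles_alt (vector : List Int) (prev : Int) : List Int :=
  prev :: accLoopB (PySem.List.slice vector (some 1) none) prev

-- ===== PRECONDITION & SPEC =====
def Spec_account_cycles (vector : List Int) (prev : Int) (out : List Int) : Prop := out = account_cycles_alt vector prev
instance (vector : List Int) (prev : Int) (out : List Int) : Decidable (Spec_account_cycles vector prev out) := by unfold Spec_account_cycles; infer_instance

-- ===== CLAIM (what is proved, stated in full; the proofs are below) =====
def Claim_equal_account_cycles : Prop := ∀ (vector : List Int) (prev : Int), Dom_account_cycles vector prev → Spec_account_cycles vector prev (account_cycles vector prev)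

-- ===== LEMMAS AND PROOFS =====

theorem while_cf_aux (prev : Int) : ∀ (n : Nat) (x : Int), (prev - x).toNat ≤ n → x < prev →
    pyWhileAdd x prev = x - 100 * PySem.Int.floordiv (x - prev) 100 := by
  intro n
  induction n with
  | zero => intro x h hx; omega
  | succ n ih =>
    intro x h hx
    rw [pyWhileAdd, if_pos hx]
    by_cases h2 : x + 100 < prev
    · rw [ih (x + 100) (by omega) h2]
      have e1 := PySem.Int.floordiv_mul_add_mod (x + 100 - prev) 100
      have e2 := PySem.Int.floordiv_mul_add_mod (x - prev) 100
      have b1 := PySem.Int.mod_nonneg (x + 100 - prev) (b := 100) (by omega)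
      have b1' := PySem.Int.mod_lt (x + 100 - prev) (b := 100) (by omega)
      have b2 := PySem.Int.mod_nonneg (x - prev) (b := 100) (by omega)
      have b2' := PySem.Int.mod_lt (x - prev) (b := 100) (by omega)
      omega
    · rw [pyWhileAdd, if_neg h2]
      have : PySem.Int.floordiv (x - prev) 100 = -1 := by
        rw [PySem.Int.floordiv_eq_iff_of_pos (by omega)]
        omega
      omega

theorem step_cf (x prev : Int) :
    (if x < prev then pyWhileAdd x prev else x)
      = x + 100 * max 0 (-(PySem.Int.floordiv (x - prev) 100)) := by
  have e := PySem.Int.floordiv_mul_add_mod (x - prev) 100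
  have b := PySem.Int.mod_nonneg (x - prev) (b := 100) (by omega)
  have b' := PySem.Int.mod_lt (x - prev) (b := 100) (by omega)
  by_cases hx : x < prev
  · rw [if_pos hx, while_cf_aux prev (prev - x).toNat x (by omega) hx]
    have hneg : PySem.Int.floordiv (x - prev) 100 ≤ 0 := by omega
    rw [max_eq_right (by omega)]
    ring
  · rw [if_neg hx]
    have hpos : 0 ≤ PySem.Int.floordiv (x - prev) 100 := by omega
    rw [max_eq_left (by omega)]
    ring

theorem loop_eq : ∀ (l : List Int) (prev : Int), accLoopA l prev = accLoopB l prev := by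
  intro l
  induction l with
  | nil => intro prev; rfl
  | cons x rest ih =>
    intro prev
    have h := step_cf x prev
    by_cases hx : x < prev
    · simp only [accLoopA, accLoopB, if_pos hx] at *
      rw [← h, ih]
    · simp only [accLoopA, accLoopB, if_neg hx] at *
      rw [← h, ih]

-- ===== VERDICT (by name: the statement is the Claim_ definition above) =====
theorem account_cycles_spec : Claim_equal_account_cycles := by
  intro vector prev _
  unfold Spec_account_cycles account_cycles account_cycles_alt
  rw [loop_eq]
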